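-- pv_equiv track=rewrite | github.com/Morgan-C-CV/Genflow | Genflow/backend/src/app/agent/workflow_graph_patch_builder.py | _map_node_targets
-- ===== SOURCE A (Python) =====
-- def _map_node_targets(target_fields: list[str]) -> dict[str, list[str]]:
--     node_targets: dict[str, list[str]] = {}
--     for field in target_fields:
--         if field in {"prompt", "negative_prompt"}:
--             node_targets.setdefault("intent.prompt", []).append(field)
--         else:
--             node_targets.setdefault("render.model", []).append(field)
--     return node_targets
-- ===== SOURCE B (Python) =====
-- def _map_node_targets(target_fields: list[str]) -> dict[str, list[str]]:
--     def node_of(f: str) -> str: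
--         return "intent.prompt" if f in ("prompt", "negative_prompt") else "render.model"
--
--     nodes = dict.fromkeys(node_of(f) for f in target_fields)
--     return {n: [f for f in target_fields if node_of(f) == n] for n in nodes}
-- ===== Notes on version B (the rewrite author's own statement) =====
-- stated objective: idiomatic
-- what changed: Replaces the interleaved setdefault/append loop with a two-stage comprehension: first collect the distinct node keys in first-occurrence order via dict.fromkeys, then gather each key's fields by filtering the input once per key.
import Mathlib
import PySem

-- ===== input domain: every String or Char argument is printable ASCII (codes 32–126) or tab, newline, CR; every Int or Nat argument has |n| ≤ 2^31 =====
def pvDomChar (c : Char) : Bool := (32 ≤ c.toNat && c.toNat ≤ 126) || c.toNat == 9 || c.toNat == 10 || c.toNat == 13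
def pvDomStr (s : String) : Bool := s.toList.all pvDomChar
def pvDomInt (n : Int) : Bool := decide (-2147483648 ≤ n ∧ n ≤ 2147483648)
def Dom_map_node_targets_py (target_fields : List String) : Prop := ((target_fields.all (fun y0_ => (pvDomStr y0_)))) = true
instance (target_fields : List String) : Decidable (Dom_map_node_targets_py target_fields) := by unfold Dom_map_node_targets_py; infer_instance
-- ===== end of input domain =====

-- B replaces A's interleaved setdefault/append loop by a two-stage comprehension:
-- distinct node keys in first-occurrence order (dict.fromkeys), then a filter per key (idiomatic; same cost).

-- ===== PORT A =====
def map_node_targets_py (target_fields : List String) : List (String × List String) :=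
  (target_fields.foldl (fun node_targets field =>
      if field = "prompt" ∨ field = "negative_prompt" then
        node_targets.modify "intent.prompt" [] (· ++ [field])   -- setdefault(…, []).append(field)
      else
        node_targets.modify "render.model" [] (· ++ [field]))
    (PySem.Dict.empty : PySem.Dict String (List String))).items

-- ===== PORT B =====
def nodeOf (f : String) : String :=
  if f = "prompt" ∨ f = "negative_prompt" then "intent.prompt" else "render.model"

def map_node_targets_py_alt (target_fields : List String) : List (String × List String) :=
  (PySem.List.dedup (target_fields.map nodeOf)).map
    (fun n => (n, target_fields.filter (fun f => nodeOf f == n)))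

-- ===== PRECONDITION & SPEC =====
def Spec_map_node_targets_py (target_fields : List String) (out : List (String × List String)) : Prop := out = map_node_targets_py_alt target_fields
instance (target_fields : List String) (out : List (String × List String)) : Decidable (Spec_map_node_targets_py target_fields out) := by unfold Spec_map_node_targets_py; infer_instance

-- ===== CLAIM =====
def Claim_equal_map_node_targets_py : Prop := ∀ (target_fields : List String), Dom_map_node_targets_py target_fields → Spec_map_node_targets_py target_fields (map_node_targets_py target_fields)

-- ===== LEMMAS AND PROOFS =====

-- A's fold, with the branch folded into the key via nodeOf
lemma fold_step_eq (target_fields : List String) :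
    target_fields.foldl (fun node_targets field =>
      if field = "prompt" ∨ field = "negative_prompt" then
        node_targets.modify "intent.prompt" [] (· ++ [field])
      else
        node_targets.modify "render.model" [] (· ++ [field]))
      (PySem.Dict.empty : PySem.Dict String (List String))
    = target_fields.foldl (fun d field => d.modify (nodeOf field) [] (· ++ [field]))
      PySem.Dict.empty := by
  apply PySem.List.foldl_congr_mem
  intro d f _
  unfold nodeOf
  split <;> rfl

lemma keys_fold (target_fields : List String) :
    (target_fields.foldl (fun d field => d.modify (nodeOf field) [] (· ++ [field]))
      (PySem.Dict.empty : PySem.Dict String (List String))).keys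
    = PySem.List.dedup (target_fields.map nodeOf) := by
  rw [PySem.Dict.keys_foldl_modify_key]
  simp [PySem.Dict.keys_empty, PySem.Set.update_nil_left, PySem.List.dedup_eq_ofList]

lemma getD_fold (target_fields : List String) (c : String) :
    (target_fields.foldl (fun d field => d.modify (nodeOf field) [] (· ++ [field]))
      (PySem.Dict.empty : PySem.Dict String (List String))).getD c []
    = target_fields.filter (fun f => nodeOf f == c) := by
  have h : target_fields.foldl (fun d field => d.modify (nodeOf field) [] (· ++ [field]))
      (PySem.Dict.empty : PySem.Dict String (List String))
      = (target_fields.map (fun f => (nodeOf f, f))).foldl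
          (fun d p => d.modify p.1 [] (· ++ [p.2])) PySem.Dict.empty := by
    rw [List.foldl_map]
  rw [h, PySem.Dict.getD_foldl_modify_append]
  simp [List.filter_map, Function.comp_def]

-- ===== VERDICT =====
theorem map_node_targets_py_spec : Claim_equal_map_node_targets_py := by
  intro target_fields _
  unfold Spec_map_node_targets_py map_node_targets_py map_node_targets_py_alt
  rw [fold_step_eq]
  rw [PySem.Dict.items_eq_map_keys _ ?nodup ([] : List String)]
  · rw [keys_fold]
    apply List.map_congr_left
    intro n _
    rw [getD_fold]
  case nodup =>
    exact PySem.Dict.nodup_keys_foldl_modify_key _ _ _ _ _ (by simp [PySem.Dict.keys_empty])
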